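-- pv_equiv track=rewrite | github.com/milankoster/Animal-Shelter-Predictions | Flask-App/app.py | parse_colors
-- ===== SOURCE A (Python) =====
-- def parse_colors(colors):
--     possible_colors = ['tabby', 'tricolor', 'brown', 'black', 'white', 'orange',
--                        'tortie', 'calico', 'blue', 'tan', 'brindle']
--     colors = [x.lower() for x in colors]
--     color_array = []
--     for color in possible_colors:
--         color_array.append(1) if color in colors else color_array.append(0)
--
--     return color_array
-- ===== SOURCE B (Python) =====
-- def parse_colors(colors):
--     possible_colors = ['tabby', 'tricolor', 'brown', 'black', 'white', 'orange',
--                        'tortie', 'calico', 'blue', 'tan', 'brindle']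
--     index = {color: i for i, color in enumerate(possible_colors)}
--     result = [0] * len(possible_colors)
--     for color in colors:
--         i = index.get(color.lower())
--         if i is not None:
--             result[i] = 1
--     return result
-- ===== Notes on version B (the rewrite author's own statement) =====
-- stated objective: faster
-- what changed: B makes a single pass over the input colors, marking bits in a preallocated [0]*11 vector via a color->index dict, instead of A's scanning the whole lowercased input list once per each of the 11 possible colors.
import Mathlib
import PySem

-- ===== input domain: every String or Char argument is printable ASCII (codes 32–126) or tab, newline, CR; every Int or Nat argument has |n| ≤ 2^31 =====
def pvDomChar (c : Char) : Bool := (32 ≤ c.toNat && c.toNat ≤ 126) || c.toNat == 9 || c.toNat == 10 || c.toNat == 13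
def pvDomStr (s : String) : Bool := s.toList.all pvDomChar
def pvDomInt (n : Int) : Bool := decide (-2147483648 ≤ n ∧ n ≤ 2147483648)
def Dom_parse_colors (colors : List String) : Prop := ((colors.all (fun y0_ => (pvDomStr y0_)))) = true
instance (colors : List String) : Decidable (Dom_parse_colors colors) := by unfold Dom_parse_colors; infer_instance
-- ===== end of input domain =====

-- B replaces A's rescan-per-possible-color with one pass over the input marking bits via an index dict (idiomatic; same result).

-- ===== PORT A =====
def pvPossibleColors : List String :=
  ["tabby", "tricolor", "brown", "black", "white", "orange",
   "tortie", "calico", "blue", "tan", "brindle"]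

def parse_colors (colors : List String) : List Int :=
  let colorsL := colors.map PySem.Str.lower
  pvPossibleColors.foldl
    (fun color_array color =>
      if colorsL.contains color then color_array ++ [1] else color_array ++ [0]) []

-- ===== PORT B =====
-- {color: i for i, color in enumerate(possible_colors)}
def pvColorIndex : PySem.Dict String Int :=
  (PySem.List.enumerate pvPossibleColors).foldl (fun d p => d.insert p.2 p.1) PySem.Dict.empty

-- result[i] = 1: the dict values are 0..10, so Int.toNat is exact here (never negative, always in range)
def parse_colors_alt (colors : List String) : List Int :=
  let result := List.replicate pvPossibleColors.length (0 : Int)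
  colors.foldl
    (fun result color =>
      match pvColorIndex.get? (PySem.Str.lower color) with
      | some i => result.set i.toNat 1
      | none => result) result

-- ===== PRECONDITION & SPEC =====
def Spec_parse_colors (colors : List String) (out : List Int) : Prop := out = parse_colors_alt colors
instance (colors : List String) (out : List Int) : Decidable (Spec_parse_colors colors out) := by unfold Spec_parse_colors; infer_instance

-- ===== CLAIM (what is proved, stated in full; the proofs are below) =====
def Claim_equal_parse_colors : Prop := ∀ (colors : List String), Dom_parse_colors colors → Spec_parse_colors colors (parse_colors colors)


-- ===== LEMMAS AND PROOFS =====

theorem pvDictLit : pvColorIndex = PySem.Dict.mk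
    [("tabby", 0), ("tricolor", 1), ("brown", 2), ("black", 3), ("white", 4),
     ("orange", 5), ("tortie", 6), ("calico", 7), ("blue", 8), ("tan", 9),
     ("brindle", 10)] := by rfl

theorem pvGetNil (s : String) : (PySem.Dict.mk ([] : List (String × Int))).get? s = none := rfl

-- every successful lookup returns the index of its key in pvPossibleColors
set_option maxHeartbeats 2000000 in
theorem pvGet_some (s : String) (i : Int) (h : pvColorIndex.get? s = some i) :
    ∃ k : Nat, k < 11 ∧ i = (k : Int) ∧ pvPossibleColors[k]? = some s := by
  rw [pvDictLit] at h
  simp only [PySem.Dict.get?_mk_cons, beq_iff_eq] at h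
  split_ifs at h with h1 h2 h3 h4 h5 h6 h7 h8 h9 h10 h11
  · exact ⟨0, by omega, (Option.some.inj h).symm, by rw [← h1]; rfl⟩
  · exact ⟨1, by omega, (Option.some.inj h).symm, by rw [← h2]; rfl⟩
  · exact ⟨2, by omega, (Option.some.inj h).symm, by rw [← h3]; rfl⟩
  · exact ⟨3, by omega, (Option.some.inj h).symm, by rw [← h4]; rfl⟩
  · exact ⟨4, by omega, (Option.some.inj h).symm, by rw [← h5]; rfl⟩
  · exact ⟨5, by omega, (Option.some.inj h).symm, by rw [← h6]; rfl⟩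
  · exact ⟨6, by omega, (Option.some.inj h).symm, by rw [← h7]; rfl⟩
  · exact ⟨7, by omega, (Option.some.inj h).symm, by rw [← h8]; rfl⟩
  · exact ⟨8, by omega, (Option.some.inj h).symm, by rw [← h9]; rfl⟩
  · exact ⟨9, by omega, (Option.some.inj h).symm, by rw [← h10]; rfl⟩
  · exact ⟨10, by omega, (Option.some.inj h).symm, by rw [← h11]; rfl⟩
  · rw [pvGetNil] at h; cases h

-- the color sitting at index j is found by the dict, at value j
theorem pvGet_back (j : Nat) (hj : j < 11) (s : String)
    (h : pvPossibleColors[j]? = some s) : pvColorIndex.get? s = some ((j : Nat) : Int) := by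
  interval_cases j <;> (injection h with hs; subst hs; decide)

def pvStepB (r : List Int) (color : String) : List Int :=
  match pvColorIndex.get? (PySem.Str.lower color) with
  | some i => r.set i.toNat 1
  | none => r

theorem pvStepB_length (r : List Int) (c : String) : (pvStepB r c).length = r.length := by
  unfold pvStepB; split <;> simp

theorem pvFoldB_length (cs : List String) (r : List Int) :
    (cs.foldl pvStepB r).length = r.length := by
  induction cs generalizing r with
  | nil => rfl
  | cons c cs ih => rw [List.foldl_cons, ih, pvStepB_length]

theorem pvStepB_get (r : List Int) (hr : r.length = 11) (c : String) (j : Nat) (hj : j < 11) :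
    (pvStepB r c)[j]? = if pvPossibleColors[j]? = some (PySem.Str.lower c) then some 1 else r[j]? := by
  unfold pvStepB
  cases hg : pvColorIndex.get? (PySem.Str.lower c) with
  | none =>
    have hne : ¬ pvPossibleColors[j]? = some (PySem.Str.lower c) := by
      intro h
      have hb := pvGet_back j hj _ h
      rw [hg] at hb
      cases hb
    rw [if_neg hne]
  | some i =>
    obtain ⟨k, hk, rfl, hkc⟩ := pvGet_some _ i hg
    by_cases hjk : j = k
    · subst hjk
      rw [if_pos hkc]
      simp [hr, hj]
    · have hne : ¬ pvPossibleColors[j]? = some (PySem.Str.lower c) := by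
        intro h
        have hb := pvGet_back j hj _ h
        rw [hg] at hb
        have hkj : k = j := by exact_mod_cast Option.some.inj hb
        exact hjk hkj.symm
      rw [if_neg hne]
      rw [List.getElem?_set_ne (by simpa using fun h => hjk h.symm)]

theorem pvFoldB_get (cs : List String) (r : List Int) (hr : r.length = 11) (j : Nat) (hj : j < 11) :
    (cs.foldl pvStepB r)[j]? =
      if cs.any (fun c => pvPossibleColors[j]? == some (PySem.Str.lower c)) then some 1 else r[j]? := by
  induction cs generalizing r with
  | nil => simp
  | cons c cs ih =>
    rw [List.foldl_cons, ih (pvStepB r c) (by rw [pvStepB_length, hr]),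
      List.any_cons, pvStepB_get r hr c j hj]
    by_cases h1 : pvPossibleColors[j]? = some (PySem.Str.lower c)
    · have hb : (pvPossibleColors[j]? == some (PySem.Str.lower c)) = true := beq_iff_eq.mpr h1
      rw [hb]
      simp [h1]
    · have hb : (pvPossibleColors[j]? == some (PySem.Str.lower c)) = false := by
        simpa using h1
      rw [hb]
      simp [h1]

theorem pvIteAppendSingleton {b : Prop} [Decidable b] (a : List Int) (x y : Int) :
    (if b then a ++ [x] else a ++ [y]) = a ++ [if b then x else y] := by
  split_ifs <;> rfl

-- ===== VERDICT (by name: the statement is the Claim_ definition above) =====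
theorem parse_colors_spec : Claim_equal_parse_colors := by
  intro colors _
  unfold Spec_parse_colors parse_colors parse_colors_alt
  show pvPossibleColors.foldl _ [] = colors.foldl pvStepB (List.replicate pvPossibleColors.length 0)
  have hA : pvPossibleColors.foldl
      (fun color_array color =>
        if (colors.map PySem.Str.lower).contains color then color_array ++ [1]
        else color_array ++ [0]) [] =
      pvPossibleColors.map
        (fun color => if (colors.map PySem.Str.lower).contains color then (1 : Int) else 0) := by
    rw [show (fun (color_array : List Int) color =>
        if (colors.map PySem.Str.lower).contains color then color_array ++ [1]
        else color_array ++ [0]) =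
        (fun color_array color => color_array ++
          [if (colors.map PySem.Str.lower).contains color then (1 : Int) else 0]) from by
      funext a c; exact pvIteAppendSingleton a 1 0]
    rw [PySem.List.foldl_append_singleton_eq_map]
    simp
  rw [hA]
  apply List.ext_getElem?
  intro j
  by_cases hj : j < 11
  · rw [pvFoldB_get colors (List.replicate pvPossibleColors.length 0) (by rfl) j hj]
    rw [List.getElem?_map]
    have hjlen0 : j < pvPossibleColors.length := by
      simp only [pvPossibleColors, List.length_cons, List.length_nil]; omega
    obtain ⟨p, hp⟩ : ∃ p, pvPossibleColors[j]? = some p :=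
      ⟨_, List.getElem?_eq_getElem hjlen0⟩
    rw [hp]
    have hrep : (List.replicate pvPossibleColors.length (0 : Int))[j]? = some 0 := by
      rw [List.getElem?_eq_getElem (by simpa using hjlen0)]
      simp
    rw [hrep]
    have hcont : (colors.map PySem.Str.lower).contains p =
        colors.any (fun c => some p == some (PySem.Str.lower c)) := by
      rw [List.contains_eq_any_beq, List.any_map]
      rfl
    simp only [Option.map_some]
    rw [hcont]
    split_ifs <;> rfl
  · have h1 : (pvPossibleColors.map
        (fun color => if (colors.map PySem.Str.lower).contains color then (1 : Int) else 0))[j]? = none := by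
      apply List.getElem?_eq_none
      simpa [pvPossibleColors] using Nat.le_of_not_lt hj
    have h2 : (colors.foldl pvStepB (List.replicate pvPossibleColors.length 0))[j]? = none := by
      apply List.getElem?_eq_none
      rw [pvFoldB_length]
      simpa [pvPossibleColors] using Nat.le_of_not_lt hj
    rw [h1, h2]
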